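-- pv_equiv track=rewrite | github.com/Selucus/OthelloAI | MiniMax.py | flipIfValid
-- ===== SOURCE A (Python) =====
-- SIZE = 8
--
-- def flipIfValid(location,direction,colour,board):
--
--     curX = (location%8) + direction[0]
--     curY = (location//8) - direction[1]
--
--
--     if curX < 0 or curY < 0 or curX >= SIZE or curY >= SIZE:
--         # If we are off the edge of the board, it is not valid
--         return False, board
--     elif board[curY*8 + curX] == '0':
--         # If we find a blank tile, this direction is not valid
--         return False, board
--     elif board[curY*8 + curX] == colour:
--         # If we find a tile that is the same as the tile we are checking,
--         # this is a valid direction to flip so pass True back to the previous call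
--
--         return True, board
--
--     else:
--
--         # If the tile is the opposite colour,
--         # call the subroutine on the next tile in this direction
--         change, board = flipIfValid(curY*8+curX,direction,colour,board)
--         # If the subroutine finds this is a valid direction, change will be True
--
--         if change:
--             # Change the board variable so that the current tile is flipped
--             board = board[:curY*8 + curX] + colour + board[1+curY*8 + curX:]
--
--         # Return whether we are changing and the new board version
--         return change,board
-- ===== SOURCE B (Python) =====
-- SIZE = 8
--
-- def flipIfValid(location, direction, colour, board):
--     # Iterative walk instead of recursion: collect the indices of the
--     # opposite-colour run, then rebuild the board once at the end.
--     x = (location % 8) + direction[0]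
--     y = (location // 8) - direction[1]
--     flips = []
--     while True:
--         if x < 0 or y < 0 or x >= SIZE or y >= SIZE:
--             return False, board
--         i = y * 8 + x
--         if board[i] == '0':
--             return False, board
--         if board[i] == colour:
--             cells = list(board)
--             for j in flips:
--                 cells[j] = colour
--             return True, ''.join(cells)
--         flips.append(i)
--         x += direction[0]
--         y -= direction[1]
-- ===== Notes on version B (the rewrite author's own statement) =====
-- stated objective: simpler
-- what changed: Replaces A's recursion (which splices a fresh string at every unwinding step) by a single iterative walk that collects the indices to flip and rebuilds the board once from a char list at the end.
-- outside the precondition, e.g. on flipIfValid(0, (1, 0), '1', '00'): A returns (False, '00'), B returns (False, '00')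
import Mathlib
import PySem

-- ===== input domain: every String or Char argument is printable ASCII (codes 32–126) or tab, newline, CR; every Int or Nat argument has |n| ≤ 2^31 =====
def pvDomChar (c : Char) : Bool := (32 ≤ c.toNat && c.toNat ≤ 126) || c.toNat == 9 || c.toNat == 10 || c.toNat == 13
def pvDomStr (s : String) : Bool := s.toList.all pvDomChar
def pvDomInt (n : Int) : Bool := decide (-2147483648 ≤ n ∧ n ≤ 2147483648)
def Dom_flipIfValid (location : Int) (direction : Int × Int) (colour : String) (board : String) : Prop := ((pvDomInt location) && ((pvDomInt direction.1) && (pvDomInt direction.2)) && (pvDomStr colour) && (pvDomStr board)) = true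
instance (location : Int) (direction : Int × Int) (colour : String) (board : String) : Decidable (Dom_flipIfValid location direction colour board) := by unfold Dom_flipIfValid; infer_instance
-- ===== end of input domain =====

-- B replaces A's recursion-with-string-splicing by one iterative walk that
-- collects the indices to flip and rebuilds the board once (objective: simpler).

-- ===== PORT A =====
-- A's recursion, with a fuel counter only to make it structural: under
-- Pre_ (64-char board, direction ≠ (0,0)) the walk takes at most 10 calls,
-- so fuel 64 is never exhausted there.
def pvGoA : Nat → Int → Int → Int → String → String → Bool × String
  | 0, _, _, _, _, board => (false, board)
  | (f+1), loc, dx, dy, colour, board =>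
    let curX := PySem.Int.mod loc 8 + dx
    let curY := PySem.Int.floordiv loc 8 - dy
    if curX < 0 ∨ curY < 0 ∨ 8 ≤ curX ∨ 8 ≤ curY then (false, board)
    else
      match PySem.Str.pyGet? board (curY*8 + curX) with
      | none => (false, board)  -- board[curY*8+curX] raises IndexError: excluded by Pre_
      | some t =>
        if String.singleton t = "0" then (false, board)
        else if String.singleton t = colour then (true, board)
        else
          let r := pvGoA f (curY*8 + curX) dx dy colour board
          if r.1 then
            (r.1, PySem.Str.slice r.2 none (some (curY*8 + curX)) ++ colour ++
                  PySem.Str.slice r.2 (some (1 + curY*8 + curX)) none)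
          else (r.1, r.2)

def flipIfValid (location : Int) (direction : Int × Int) (colour : String) (board : String) : Bool × String :=
  pvGoA 64 location direction.1 direction.2 colour board

-- ===== PORT B =====
-- B's iterative walk; pySetD is the total form of B's `cells[j] = colour`
-- (j is always in range there).  Fuel again only makes the loop structural.
def pvGoB : Nat → Int → Int → Int → Int → String → String → List Int → Bool × String
  | 0, _, _, _, _, _, board, _ => (false, board)
  | (f+1), x, y, dx, dy, colour, board, flips =>
    if x < 0 ∨ y < 0 ∨ 8 ≤ x ∨ 8 ≤ y then (false, board)
    else
      match PySem.Str.pyGet? board (y*8 + x) with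
      | none => (false, board)  -- board[i] raises IndexError: excluded by Pre_
      | some t =>
        if String.singleton t = "0" then (false, board)
        else if String.singleton t = colour then
          (true, PySem.Str.join "" (flips.foldl (fun cs j => PySem.List.pySetD cs j colour)
                   (board.toList.map String.singleton)))
        else pvGoB f (x+dx) (y-dy) dx dy colour board (flips ++ [y*8 + x])

def flipIfValid_alt (location : Int) (direction : Int × Int) (colour : String) (board : String) : Bool × String :=
  pvGoB 64 (PySem.Int.mod location 8 + direction.1) (PySem.Int.floordiv location 8 - direction.2)
    direction.1 direction.2 colour board []

-- ===== PRECONDITION & SPEC =====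
-- Pre_ excludes the inputs on which the Python A can raise: unless the very
-- first step already leaves the 8×8 grid (then A returns at once), the board
-- must have the 64 characters the game assumes (else IndexError is possible
-- partway down the walk) and the direction must not be (0,0) (unbounded
-- recursion, RecursionError); my Python B raises / loops on the same inputs.
def Pre_flipIfValid (location : Int) (direction : Int × Int) (colour : String) (board : String) : Prop :=
  (PySem.Int.mod location 8 + direction.1 < 0 ∨ PySem.Int.floordiv location 8 - direction.2 < 0 ∨
   8 ≤ PySem.Int.mod location 8 + direction.1 ∨ 8 ≤ PySem.Int.floordiv location 8 - direction.2) ∨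
  (board.toList.length = 64 ∧ direction ≠ (0, 0))
instance (location : Int) (direction : Int × Int) (colour : String) (board : String) : Decidable (Pre_flipIfValid location direction colour board) := by unfold Pre_flipIfValid; infer_instance

def pvWitness_flipIfValid : Int × (Int × Int) × String × String :=
  (20, (1, 0), "1", "0000000000000000000012110000000000000000000000000000000000000000")

def Spec_flipIfValid (location : Int) (direction : Int × Int) (colour : String) (board : String) (out : Bool × String) : Prop := out = flipIfValid_alt location direction colour board
instance (location : Int) (direction : Int × Int) (colour : String) (board : String) (out : Bool × String) : Decidable (Spec_flipIfValid location direction colour board out) := by unfold Spec_flipIfValid; infer_instance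

-- ===== CLAIM (what is proved, stated in full; the proofs are below) =====
def Claim_equal_flipIfValid : Prop := ∀ (location : Int) (direction : Int × Int) (colour : String) (board : String), Dom_flipIfValid location direction colour board → Pre_flipIfValid location direction colour board → Spec_flipIfValid location direction colour board (flipIfValid location direction colour board)

-- ===== LEMMAS AND PROOFS =====

-- If A's walk fails it returns the board unchanged; if it succeeds, the colour
-- is a single character and the board length is preserved.
theorem pvGoA_invariant (f : Nat) (loc dx dy : Int) (c b : String) :
    ((pvGoA f loc dx dy c b).1 = false → (pvGoA f loc dx dy c b).2 = b) ∧
    ((pvGoA f loc dx dy c b).1 = true →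
      (∃ ch, c = String.singleton ch) ∧
      (pvGoA f loc dx dy c b).2.toList.length = b.toList.length) := by
  induction f generalizing loc with
  | zero => exact ⟨fun _ => rfl, fun h => nomatch h⟩
  | succ f ih =>
    simp only [pvGoA]
    generalize (PySem.Int.floordiv loc 8 - dy : Int) = y
    generalize hx : (PySem.Int.mod loc 8 + dx : Int) = x
    by_cases hedge : x < 0 ∨ y < 0 ∨ 8 ≤ x ∨ 8 ≤ y
    · rw [if_pos hedge]
      exact ⟨fun _ => rfl, fun h => nomatch h⟩
    · rw [if_neg hedge]
      have hi0 : 0 ≤ y * 8 + x := by omega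
      cases hget : PySem.Str.pyGet? b (y * 8 + x) with
      | none =>
        exact ⟨fun _ => rfl, fun h => nomatch h⟩
      | some t =>
        dsimp only
        by_cases h0 : String.singleton t = "0"
        · rw [if_pos h0]
          exact ⟨fun _ => rfl, fun h => nomatch h⟩
        · rw [if_neg h0]
          by_cases hc : String.singleton t = c
          · rw [if_pos hc]
            constructor
            · intro h; exact nomatch h
            · intro _; exact ⟨⟨t, hc.symm⟩, rfl⟩
          · rw [if_neg hc]
            obtain ⟨ih1, ih2⟩ := ih (y * 8 + x)
            cases hr : (pvGoA f (y * 8 + x) dx dy c b).1 with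
            | false =>
              rw [if_neg (by simp : ¬(false = true))]
              exact ⟨fun _ => ih1 hr, fun h => nomatch h⟩
            | true =>
              rw [if_pos rfl]
              constructor
              · intro h; exact nomatch h
              intro _
              obtain ⟨⟨ch, hch⟩, hlen⟩ := ih2 hr
              have hibd : (y * 8 + x).toNat < b.toList.length := by
                rw [PySem.Str.pyGet?_eq, PySem.Chars.pyGet?_eq_listPyGet?,
                    PySem.List.pyGet?_of_nonneg _ hi0] at hget
                exact (List.getElem?_eq_some_iff.mp hget).1
              refine ⟨⟨ch, hch⟩, ?_⟩
              have h1 : (PySem.Str.slice (pvGoA f (y*8+x) dx dy c b).2 none (some (y*8+x))).toList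
                  = (pvGoA f (y*8+x) dx dy c b).2.toList.take (y*8+x).toNat := by
                rw [PySem.Str.toList_slice, PySem.Chars.slice_eq_listSlice,
                    PySem.List.slice_to _ hi0]
              have h2 : (PySem.Str.slice (pvGoA f (y*8+x) dx dy c b).2 (some (1 + y*8 + x)) none).toList
                  = (pvGoA f (y*8+x) dx dy c b).2.toList.drop (1 + y*8 + x).toNat := by
                rw [PySem.Str.toList_slice, PySem.Chars.slice_eq_listSlice,
                    PySem.List.slice_from _ (by omega)]
              rw [String.toList_append, String.toList_append, List.length_append,
                  List.length_append, h1, h2, List.length_take, List.length_drop]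
              have hc1 : c.toList.length = 1 := by
                rw [hch, String.toList_singleton, List.length_singleton]
              omega

theorem pvSetD_comm_same (cs : List String) (i j : Int) (c : String)
    (hi : 0 ≤ i) (hj : 0 ≤ j) :
    PySem.List.pySetD (PySem.List.pySetD cs i c) j c
      = PySem.List.pySetD (PySem.List.pySetD cs j c) i c := by
  rw [PySem.List.pySetD_of_nonneg cs c hi, PySem.List.pySetD_of_nonneg _ c hj,
      PySem.List.pySetD_of_nonneg cs c hj, PySem.List.pySetD_of_nonneg _ c hi]
  by_cases h : i.toNat = j.toNat
  · rw [h]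
  · exact List.set_comm _ _ h

theorem pvFoldl_setD_comm (flips : List Int) (cs : List String) (i : Int) (c : String)
    (hi : 0 ≤ i) (hf : ∀ j ∈ flips, 0 ≤ j) :
    PySem.List.pySetD (flips.foldl (fun cs j => PySem.List.pySetD cs j c) cs) i c
      = flips.foldl (fun cs j => PySem.List.pySetD cs j c) (PySem.List.pySetD cs i c) := by
  induction flips generalizing cs with
  | nil => rfl
  | cons a t ih =>
    simp only [List.foldl_cons]
    rw [ih _ (fun j hj => hf j (by simp [hj])),
        pvSetD_comm_same _ _ _ _ hi (hf a (by simp))]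

theorem pvCoordMod (x y : Int) (h0 : 0 ≤ x) (h8 : x < 8) :
    PySem.Int.mod (y * 8 + x) 8 = x := by
  rw [PySem.Int.mod_eq_emod_of_pos (show (0:Int) < 8 by norm_num)]
  omega

theorem pvCoordDiv (x y : Int) (h0 : 0 ≤ x) (h8 : x < 8) :
    PySem.Int.floordiv (y * 8 + x) 8 = y := by
  rw [PySem.Int.floordiv_eq_ediv_of_pos (show (0:Int) < 8 by norm_num)]
  omega

theorem pvJoin_singletons (s : String) :
    PySem.Str.join "" (s.toList.map String.singleton) = s := by
  apply String.toList_inj.mp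
  simp [List.map_map, Function.comp_def]

-- The main correspondence between A's recursion and B's iterative walk.
theorem pvMain (f : Nat) (loc dx dy : Int) (c b : String) (flips : List Int)
    (hf : ∀ j ∈ flips, 0 ≤ j) :
    pvGoB f (PySem.Int.mod loc 8 + dx) (PySem.Int.floordiv loc 8 - dy) dx dy c b flips =
      ((pvGoA f loc dx dy c b).1,
       if (pvGoA f loc dx dy c b).1 = true
       then PySem.Str.join "" (flips.foldl (fun cs j => PySem.List.pySetD cs j c)
              ((pvGoA f loc dx dy c b).2.toList.map String.singleton))
       else b) := by
  induction f generalizing loc flips with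
  | zero => simp [pvGoA, pvGoB]
  | succ f ih =>
    simp only [pvGoB]
    generalize hy : (PySem.Int.floordiv loc 8 - dy : Int) = y
    generalize hx : (PySem.Int.mod loc 8 + dx : Int) = x
    by_cases hedge : x < 0 ∨ y < 0 ∨ 8 ≤ x ∨ 8 ≤ y
    · have hA : pvGoA (f+1) loc dx dy c b = (false, b) := by
        simp only [pvGoA]; rw [hy, hx, if_pos hedge]
      rw [if_pos hedge, hA]
      simp
    · rw [if_neg hedge]
      have hx0 : 0 ≤ x := by omega
      have hx8 : x < 8 := by omega
      have hi0 : 0 ≤ y * 8 + x := by omega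
      cases hget : PySem.Str.pyGet? b (y * 8 + x) with
      | none =>
        have hA : pvGoA (f+1) loc dx dy c b = (false, b) := by
          simp only [pvGoA]; rw [hy, hx, if_neg hedge, hget]
        rw [hA]
        simp
      | some t =>
        dsimp only
        by_cases h0 : String.singleton t = "0"
        · have hA : pvGoA (f+1) loc dx dy c b = (false, b) := by
            simp only [pvGoA]; rw [hy, hx, if_neg hedge, hget]
            dsimp only; rw [if_pos h0]
          rw [if_pos h0, hA]
          simp
        · rw [if_neg h0]
          by_cases hc : String.singleton t = c
          · have hA : pvGoA (f+1) loc dx dy c b = (true, b) := by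
              simp only [pvGoA]; rw [hy, hx, if_neg hedge, hget]
              dsimp only; rw [if_neg h0, if_pos hc]
            rw [if_pos hc, hA]
            simp
          · rw [if_neg hc]
            have ihi := ih (y * 8 + x) (flips ++ [y * 8 + x])
              (by intro j hj
                  rcases List.mem_append.mp hj with h | h
                  · exact hf j h
                  · simp at h; omega)
            rw [pvCoordMod x y hx0 hx8, pvCoordDiv x y hx0 hx8] at ihi
            rw [ihi]
            cases hr : (pvGoA f (y * 8 + x) dx dy c b).1 with
            | false =>
              have hA : pvGoA (f+1) loc dx dy c b
                  = (false, (pvGoA f (y * 8 + x) dx dy c b).2) := by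
                simp only [pvGoA]; rw [hy, hx, if_neg hedge, hget]
                dsimp only; rw [if_neg h0, if_neg hc, hr, if_neg (by simp : ¬(false = true))]
              rw [hA]
              simp
            | true =>
              have hA : pvGoA (f+1) loc dx dy c b
                  = (true, PySem.Str.slice (pvGoA f (y*8+x) dx dy c b).2 none (some (y*8+x)) ++ c ++
                      PySem.Str.slice (pvGoA f (y*8+x) dx dy c b).2 (some (1 + y*8 + x)) none) := by
                simp only [pvGoA]; rw [hy, hx, if_neg hedge, hget]
                dsimp only; rw [if_neg h0, if_neg hc, hr, if_pos rfl]
              rw [hA]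
              rw [if_pos rfl, if_pos rfl]
              obtain ⟨ch, hch⟩ := ((pvGoA_invariant f (y*8+x) dx dy c b).2 hr).1
              have hlen := ((pvGoA_invariant f (y*8+x) dx dy c b).2 hr).2
              have hibd : (y * 8 + x).toNat < b.toList.length := by
                rw [PySem.Str.pyGet?_eq, PySem.Chars.pyGet?_eq_listPyGet?,
                    PySem.List.pyGet?_of_nonneg _ hi0] at hget
                exact (List.getElem?_eq_some_iff.mp hget).1
              refine Prod.ext rfl ?_
              dsimp only
              congr 1
              rw [List.foldl_append, List.foldl_cons, List.foldl_nil,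
                  pvFoldl_setD_comm flips _ _ _ hi0 hf]
              congr 1
              set r2 := (pvGoA f (y*8+x) dx dy c b).2 with hr2
              have hsl1 : (PySem.Str.slice r2 none (some (y*8+x))).toList
                  = r2.toList.take (y*8+x).toNat := by
                rw [PySem.Str.toList_slice, PySem.Chars.slice_eq_listSlice,
                    PySem.List.slice_to _ hi0]
              have hsl2 : (PySem.Str.slice r2 (some (1 + y*8 + x)) none).toList
                  = r2.toList.drop (1 + y*8 + x).toNat := by
                rw [PySem.Str.toList_slice, PySem.Chars.slice_eq_listSlice,
                    PySem.List.slice_from _ (by omega)]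
              rw [PySem.List.pySetD_of_nonneg _ c hi0]
              rw [List.set_eq_take_cons_drop c (by rw [List.length_map]; omega)]
              rw [String.toList_append, String.toList_append, hsl1, hsl2]
              rw [List.map_append, List.map_append, List.map_take, List.map_drop]
              have h1n : (1 + y * 8 + x).toNat = (y * 8 + x).toNat + 1 := by omega
              rw [h1n, hch, String.toList_singleton]
              simp
-- ===== VERDICT (by name: the statement is the Claim_ definition above) =====
theorem flipIfValid_spec : Claim_equal_flipIfValid := by
  intro location direction colour board _ _
  unfold Spec_flipIfValid flipIfValid flipIfValid_alt
  rw [pvMain 64 location direction.1 direction.2 colour board [] (by simp)]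
  cases hr : (pvGoA 64 location direction.1 direction.2 colour board).1 with
  | false =>
    rw [if_neg (by simp : ¬(false = true))]
    have := (pvGoA_invariant 64 location direction.1 direction.2 colour board).1 hr
    rw [Prod.ext_iff]
    exact ⟨hr, this⟩
  | true =>
    rw [if_pos rfl, List.foldl_nil, pvJoin_singletons]
    exact Prod.ext_iff.mpr ⟨hr, rfl⟩
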